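-- pv_equiv track=rewrite | github.com/Cxcosmo/PSCP-IT_Kmitl_Year1_Term1 | MockTest/Volleyball.py | r_one_to_five
-- ===== SOURCE A (Python) =====
-- def r_one_to_five(s, r) :
--     """r"""
--     a = 0
--     b = 0
--     err = 0
--     c = ""
--     w = "c"
--     for i in s :
--         if not err :
--             if i == "A" :
--                 a += 1
--             else :
--                 b += 1
--             if r < 5 :
--                 if a >= 25 and a - b >= 2 :
--                     w = "a"
--                     err += 1
--                 elif b >= 25 and b - a >= 2 :
--                     w = "b"
--                     err += 1
--             else :
--                 if a >= 15 and a - b >= 2 :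
--                     w = "a"
--                     err += 1
--                 elif b >= 15 and b - a >= 2 :
--                     w = "b"
--                     err += 1
--             c += ""
--         else :
--             c += i
--     return c, w, f"Set {r}: A ({a}) | B ({b})"
-- ===== SOURCE B (Python) =====
-- def r_one_to_five(s, r):
--     a = 0
--     b = 0
--     t = 25 if r < 5 else 15
--     c = ""
--     w = "c"
--     for idx, ch in enumerate(s):
--         if ch == "A":
--             a += 1
--         else:
--             b += 1
--         if a >= t and a - b >= 2:
--             w = "a"
--             c = s[idx + 1:]
--             break
--         if b >= t and b - a >= 2:
--             w = "b"
--             c = s[idx + 1:]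
--             break
--     return c, w, f"Set {r}: A ({a}) | B ({b})"
-- ===== Notes on version B (the rewrite author's own statement) =====
-- stated objective: simpler
-- what changed: Drops the err flag and its per-character dead branch: B breaks out of the loop at the winning point and takes the leftover as a single slice s[idx+1:], instead of carrying a flag and appending the remaining characters one by one.
import Mathlib
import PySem

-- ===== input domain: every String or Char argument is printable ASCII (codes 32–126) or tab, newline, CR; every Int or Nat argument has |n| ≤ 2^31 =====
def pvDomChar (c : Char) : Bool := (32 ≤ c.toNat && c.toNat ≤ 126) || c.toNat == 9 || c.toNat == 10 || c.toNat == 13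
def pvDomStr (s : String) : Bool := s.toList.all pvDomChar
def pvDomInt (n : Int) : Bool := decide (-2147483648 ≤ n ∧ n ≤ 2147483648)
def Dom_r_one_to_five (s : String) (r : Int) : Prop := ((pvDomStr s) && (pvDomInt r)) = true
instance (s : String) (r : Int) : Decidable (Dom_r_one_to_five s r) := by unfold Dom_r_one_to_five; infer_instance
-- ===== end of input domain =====

-- B drops A's err flag: it breaks at the winning point and takes the leftover as one slice; same return value, simpler control flow.

-- ===== PORT A =====
-- state = (a, b, err, c, w); c kept as List Char, turned into a String at the end
def stepA (r : Int) (st : Int × Int × Int × List Char × String) (i : Char) :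
    Int × Int × Int × List Char × String :=
  let (a, b, err, c, w) := st
  if err = 0 then
    let a := if i = 'A' then a + 1 else a
    let b := if i = 'A' then b else b + 1
    if r < 5 then
      if a ≥ 25 ∧ a - b ≥ 2 then (a, b, err + 1, c, "a")
      else if b ≥ 25 ∧ b - a ≥ 2 then (a, b, err + 1, c, "b")
      else (a, b, err, c, w)
    else
      if a ≥ 15 ∧ a - b ≥ 2 then (a, b, err + 1, c, "a")
      else if b ≥ 15 ∧ b - a ≥ 2 then (a, b, err + 1, c, "b")
      else (a, b, err, c, w)
  else (a, b, err, c ++ [i], w)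

def pyMsg (r a b : Int) : String :=
  "Set " ++ PySem.Int.toStr r ++ ": A (" ++ PySem.Int.toStr a ++ ") | B (" ++ PySem.Int.toStr b ++ ")"

def r_one_to_five (s : String) (r : Int) : String × String × String :=
  let st := s.toList.foldl (stepA r) (0, 0, 0, ([] : List Char), "c")
  (String.ofList st.2.2.2.1, st.2.2.2.2, pyMsg r st.1 st.2.1)

-- ===== PORT B =====
-- B's loop with break: recursion over the characters; 'rest' is exactly the slice s[idx+1:]
def goB (t : Int) : List Char → Int → Int → Int × Int × List Char × String
  | [], a, b => (a, b, [], "c")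
  | ch :: rest, a, b =>
    let a := if ch = 'A' then a + 1 else a
    let b := if ch = 'A' then b else b + 1
    if a ≥ t ∧ a - b ≥ 2 then (a, b, rest, "a")
    else if b ≥ t ∧ b - a ≥ 2 then (a, b, rest, "b")
    else goB t rest a b

def r_one_to_five_alt (s : String) (r : Int) : String × String × String :=
  let t : Int := if r < 5 then 25 else 15
  let st := goB t s.toList 0 0
  (String.ofList st.2.2.1, st.2.2.2, pyMsg r st.1 st.2.1)

-- ===== PRECONDITION & SPEC =====
def Spec_r_one_to_five (s : String) (r : Int) (out : String × String × String) : Prop := out = r_one_to_five_alt s r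
instance (s : String) (r : Int) (out : String × String × String) : Decidable (Spec_r_one_to_five s r out) := by unfold Spec_r_one_to_five; infer_instance

-- ===== CLAIM (what is proved, stated in full; the proofs are below) =====
def Claim_equal_r_one_to_five : Prop := ∀ (s : String) (r : Int), Dom_r_one_to_five s r → Spec_r_one_to_five s r (r_one_to_five s r)

-- ===== LEMMAS AND PROOFS =====

-- once err = 1, A only appends the remaining characters to c
theorem foldA_err (r : Int) (l : List Char) : ∀ (a b : Int) (c : List Char) (w : String),
    List.foldl (stepA r) (a, b, 1, c, w) l = (a, b, 1, c ++ l, w) := by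
  induction l with
  | nil => intro a b c w; simp
  | cons ch rest ih =>
    intro a b c w
    simp only [List.foldl_cons, stepA]
    norm_num
    rw [ih]
    simp

-- the loop invariant: while err = 0, c = [] and w = "c"; relate A's fold to B's recursion
theorem foldA_goB (r : Int) (l : List Char) : ∀ (a b : Int),
    (let st := List.foldl (stepA r) (a, b, 0, ([] : List Char), "c") l
     (st.1, st.2.1, st.2.2.2.1, st.2.2.2.2)) = goB (if r < 5 then 25 else 15) l a b := by
  induction l with
  | nil => intro a b; simp [goB]
  | cons ch rest ih =>
    intro a b
    simp only [List.foldl_cons, stepA, goB]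
    by_cases hr : r < 5 <;>
      simp only [hr, if_pos, reduceIte] <;>
      split_ifs with h1 h2 <;>
      simp [foldA_err, ih, hr]

-- ===== VERDICT (by name: the statement is the Claim_ definition above) =====
theorem r_one_to_five_spec : Claim_equal_r_one_to_five := by
  intro s r _
  show _ = _
  have h := foldA_goB r s.toList 0 0
  simp only [Prod.ext_iff] at h
  simp [r_one_to_five, r_one_to_five_alt, h.1, h.2.1, h.2.2.1, h.2.2.2]
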